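-- pv_equiv track=rewrite | github.com/Caio2810/DMOJ-Activities | CAP8/dmopc19c3p1.py | encontrar_modas
-- ===== SOURCE A (Python) =====
-- def encontrar_modas(numeros):
--     contagem = {}
--     max_frequencia = 0
--
--     for num in numeros:
--         contagem[num] = contagem.get(num, 0) + 1
--         max_frequencia = max(max_frequencia, contagem[num])
--
--     modas = [num for num, freq in contagem.items() if freq == max_frequencia]
--
--     return modas
-- ===== SOURCE B (Python) =====
-- def encontrar_modas(numeros):
--     contagem = {}
--     for num in numeros:
--         contagem[num] = contagem.get(num, 0) + 1
--     ranked = sorted(contagem.items(), key=lambda item: item[1], reverse=True)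
--     modas = []
--     for num, freq in ranked:
--         if freq != ranked[0][1]:
--             break
--         modas.append(num)
--     return modas
-- ===== Notes on version B (the rewrite author's own statement) =====
-- stated objective: alternative
-- what changed: Drops A's running-max accumulator and final max-filter pass; instead the count items are stably sorted by frequency descending (Counter.most_common style) and the leading tie group is taken with a break loop, relying on sort stability to keep first-occurrence order.
import Mathlib
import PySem

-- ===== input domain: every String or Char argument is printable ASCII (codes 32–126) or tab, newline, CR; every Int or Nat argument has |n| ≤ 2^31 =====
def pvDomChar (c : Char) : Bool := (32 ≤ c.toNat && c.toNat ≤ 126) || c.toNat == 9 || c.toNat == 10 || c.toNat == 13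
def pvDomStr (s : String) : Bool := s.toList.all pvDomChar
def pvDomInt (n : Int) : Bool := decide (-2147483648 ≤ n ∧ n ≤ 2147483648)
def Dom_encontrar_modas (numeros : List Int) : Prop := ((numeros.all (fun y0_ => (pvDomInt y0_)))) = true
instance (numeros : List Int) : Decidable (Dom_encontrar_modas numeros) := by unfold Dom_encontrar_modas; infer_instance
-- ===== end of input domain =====

-- B replaces A's running-max accumulator and max-filter pass by a stable descending sort of the
-- count items followed by taking the leading tie group (alternative decomposition, not faster).

-- ===== PORT A =====
-- the loop body: contagem[num] = contagem.get(num, 0) + 1; max_frequencia = max(max_frequencia, contagem[num])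
-- (contagem[num] on the second line reads back the value just stored, i.e. the let-bound c)
def encontrar_modas (numeros : List Int) : List Int :=
  let st := numeros.foldl
    (fun (s : PySem.Dict Int Int × Int) num =>
      let c := s.1.getD num 0 + 1
      (s.1.insert num c, max s.2 c))
    (PySem.Dict.empty, 0)
  (st.1.items.filter (fun p => p.2 == st.2)).map (fun p => p.1)

-- ===== PORT B =====
-- the 'for num, freq in ranked: if freq != ranked[0][1]: break; modas.append(num)' loop
-- (top = ranked[0][1], constant across iterations; the loop body never runs when ranked is empty)
def pvTakeTop (top : Int) : List (Int × Int) → List Int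
  | [] => []
  | (num, freq) :: t => if freq ≠ top then [] else num :: pvTakeTop top t

def encontrar_modas_alt (numeros : List Int) : List Int :=
  let contagem := numeros.foldl
    (fun (d : PySem.Dict Int Int) num => d.insert num (d.getD num 0 + 1))
    PySem.Dict.empty
  let ranked := PySem.List.sorted contagem.items (fun item => item.2) true
  match ranked with
  | [] => []
  | (_, top) :: _ => pvTakeTop top ranked

-- ===== PRECONDITION & SPEC =====
def Spec_encontrar_modas (numeros : List Int) (out : List Int) : Prop := out = encontrar_modas_alt numeros
instance (numeros : List Int) (out : List Int) : Decidable (Spec_encontrar_modas numeros out) := by unfold Spec_encontrar_modas; infer_instance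

-- ===== CLAIM (what is proved, stated in full; the proofs are below) =====
def Claim_equal_encontrar_modas : Prop := ∀ (numeros : List Int), Dom_encontrar_modas numeros → Spec_encontrar_modas numeros (encontrar_modas numeros)

-- ===== LEMMAS AND PROOFS =====

-- the invariant A's max_frequencia accumulator maintains: an upper bound on all counts, attained (or 0)
def IsMaxCnt (q : List Int) (mf : Int) : Prop :=
  (∀ k : Int, (q.count k : Int) ≤ mf) ∧ (mf = 0 ∨ ∃ k ∈ q, (q.count k : Int) = mf)

lemma isMaxCnt_nil : IsMaxCnt [] 0 :=
  ⟨fun k => by simp, Or.inl rfl⟩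

lemma isMaxCnt_snoc (p : List Int) (x : Int) (mf : Int) (h : IsMaxCnt p mf) :
    IsMaxCnt (p ++ [x]) (max mf ((p.count x : Int) + 1)) := by
  obtain ⟨hub, hat⟩ := h
  have hcx : List.count x (p ++ [x]) = List.count x p + 1 := by simp
  have hck : ∀ k : Int, k ≠ x → List.count k (p ++ [x]) = List.count k p := by
    intro k hk
    have h0 : List.count k [x] = 0 := List.count_eq_zero.mpr (by simp [hk])
    rw [List.count_append]
    omega
  constructor
  · intro k
    by_cases hk : k = x
    · subst hk; rw [hcx]; push_cast; omega
    · rw [hck k hk]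
      have := hub k
      omega
  · by_cases hle : mf ≤ (p.count x : Int) + 1
    · right
      refine ⟨x, by simp, ?_⟩
      rw [hcx]
      push_cast
      omega
    · right
      rcases hat with h0 | ⟨k, hk, hc⟩
      · exfalso
        have := hub x
        omega
      · have hkx : k ≠ x := by
          intro he; subst he
          omega
        refine ⟨k, by simp [hk], ?_⟩
        rw [hck k hkx, hc]
        omega

lemma loopA (xs : List Int) : ∀ (p : List Int) (mf : Int), IsMaxCnt p mf →
    (xs.foldl
      (fun (s : PySem.Dict Int Int × Int) num =>
        let c := s.1.getD num 0 + 1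
        (s.1.insert num c, max s.2 c))
      (PySem.Dict.counter p, mf)).1 = PySem.Dict.counter (p ++ xs) ∧
    IsMaxCnt (p ++ xs)
      (xs.foldl
        (fun (s : PySem.Dict Int Int × Int) num =>
          let c := s.1.getD num 0 + 1
          (s.1.insert num c, max s.2 c))
        (PySem.Dict.counter p, mf)).2 := by
  induction xs with
  | nil =>
    intro p mf h
    constructor
    · simp
    · simpa using h
  | cons x t ih =>
    intro p mf h
    have hd : (PySem.Dict.counter p).insert x ((p.count x : Int) + 1)
        = PySem.Dict.counter (p ++ [x]) := by
      rw [PySem.Dict.counter_append_singleton]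
      rw [show (PySem.Dict.counter p).modify x 0 (fun v => v + 1)
          = (PySem.Dict.counter p).insert x ((PySem.Dict.counter p).getD x 0 + 1) from rfl]
      rw [PySem.Dict.getD_counter]
    have happ : (p ++ [x]) ++ t = p ++ x :: t := by simp
    have hinv := isMaxCnt_snoc p x mf h
    have hih := ih (p ++ [x]) (max mf ((p.count x : Int) + 1)) hinv
    rw [happ] at hih
    simpa only [List.foldl_cons, PySem.Dict.getD_counter, hd] using hih

lemma loopA_main (numeros : List Int) :
    (numeros.foldl
      (fun (s : PySem.Dict Int Int × Int) num =>
        let c := s.1.getD num 0 + 1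
        (s.1.insert num c, max s.2 c))
      (PySem.Dict.empty, 0)).1 = PySem.Dict.counter numeros ∧
    IsMaxCnt numeros
      (numeros.foldl
        (fun (s : PySem.Dict Int Int × Int) num =>
          let c := s.1.getD num 0 + 1
          (s.1.insert num c, max s.2 c))
        (PySem.Dict.empty, 0)).2 := by
  have h := loopA numeros [] 0 isMaxCnt_nil
  simpa using h

-- B's counting loop builds the same counter dict
lemma loopB (xs : List Int) : ∀ (p : List Int),
    xs.foldl (fun (d : PySem.Dict Int Int) num => d.insert num (d.getD num 0 + 1))
      (PySem.Dict.counter p) = PySem.Dict.counter (p ++ xs) := by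
  induction xs with
  | nil => intro p; simp
  | cons x t ih =>
    intro p
    have hd : (PySem.Dict.counter p).insert x ((PySem.Dict.counter p).getD x 0 + 1)
        = PySem.Dict.counter (p ++ [x]) := by
      rw [PySem.Dict.counter_append_singleton]
      rfl
    have := ih (p ++ [x])
    rw [show (p ++ [x]) ++ t = p ++ x :: t by simp] at this
    simpa only [List.foldl_cons, hd] using this

lemma insertBy_append_not (before : (Int × Int) → (Int × Int) → Bool) (x : Int × Int)
    (A R : List (Int × Int)) (h : ∀ a ∈ A, before x a = false) :
    PySem.List.insertBy before x (A ++ R) = A ++ PySem.List.insertBy before x R := by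
  induction A with
  | nil => rfl
  | cons a A0 ih =>
    have ha : before x a = false := h a (List.mem_cons_self)
    have hstep : PySem.List.insertBy before x (a :: (A0 ++ R))
        = a :: PySem.List.insertBy before x (A0 ++ R) := by
      simp [PySem.List.insertBy, ha]
    rw [List.cons_append, hstep, ih (fun b hb => h b (List.mem_cons_of_mem a hb)), List.cons_append]

lemma insertBy_cons_true (before : (Int × Int) → (Int × Int) → Bool) (x r : Int × Int)
    (R : List (Int × Int)) (h : before x r = true) :
    PySem.List.insertBy before x (r :: R) = x :: r :: R := by
  simp [PySem.List.insertBy, h]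

-- the stable descending insertion sort keeps the top tie group in front, in original order
lemma ranked_split (m : Int) (l : List (Int × Int)) :
    ∀ (A R : List (Int × Int)), (∀ a ∈ A, a.2 = m) → (∀ r ∈ R, r.2 < m) →
    (∀ x ∈ l, x.2 ≤ m) →
    ∃ R', (∀ r ∈ R', r.2 < m) ∧
      l.foldl (fun acc x => PySem.List.insertBy (fun a b => decide (b.2 < a.2)) x acc) (A ++ R)
        = (A ++ l.filter (fun a => a.2 == m)) ++ R' := by
  induction l with
  | nil =>
    intro A R hA hR _
    exact ⟨R, hR, by simp⟩
  | cons x t ih =>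
    intro A R hA hR hle
    have hnotA : ∀ a ∈ A, (fun a b => decide ((b : Int × Int).2 < a.2)) x a = false := by
      intro a ha
      have := hA a ha
      have hx := hle x (List.mem_cons_self)
      simp only [decide_eq_false_iff_not, not_lt, this]
      exact hx
    by_cases hx : x.2 = m
    · have hstep : PySem.List.insertBy (fun a b => decide (b.2 < a.2)) x (A ++ R)
          = (A ++ [x]) ++ R := by
        cases R with
        | nil =>
          rw [List.append_nil, PySem.List.insertBy_of_forall_not_before _ _ _ hnotA]
          simp
        | cons r R0 =>
          rw [insertBy_append_not _ _ _ _ hnotA,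
            insertBy_cons_true _ _ _ _ (by
              have := hR r (List.mem_cons_self)
              simp only [decide_eq_true_eq, hx]
              exact this)]
          simp
      have hA' : ∀ a ∈ A ++ [x], a.2 = m := by
        intro a ha
        rcases List.mem_append.mp ha with h | h
        · exact hA a h
        · simp at h; subst h; exact hx
      obtain ⟨R', h1, h2⟩ := ih (A ++ [x]) R hA' hR (fun y hy => hle y (List.mem_cons_of_mem x hy))
      refine ⟨R', h1, ?_⟩
      simp only [List.foldl_cons]
      rw [hstep, h2]
      simp [hx]
    · have hxlt : x.2 < m := lt_of_le_of_ne (hle x (List.mem_cons_self)) hx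
      have hstep : PySem.List.insertBy (fun a b => decide (b.2 < a.2)) x (A ++ R)
          = A ++ PySem.List.insertBy (fun a b => decide (b.2 < a.2)) x R :=
        insertBy_append_not _ _ _ _ hnotA
      have hR' : ∀ r ∈ PySem.List.insertBy (fun a b => decide ((b : Int × Int).2 < a.2)) x R, r.2 < m := by
        intro r hr
        rcases (PySem.List.mem_insertBy _ _ _ _).mp hr with h | h
        · subst h; exact hxlt
        · exact hR r h
      obtain ⟨R', h1, h2⟩ := ih A (PySem.List.insertBy (fun a b => decide (b.2 < a.2)) x R)
        hA hR' (fun y hy => hle y (List.mem_cons_of_mem x hy))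
      refine ⟨R', h1, ?_⟩
      simp only [List.foldl_cons]
      rw [hstep, h2]
      simp [hx]

-- the break loop consumes exactly the leading group with frequency = top
lemma takeTop_eq (m : Int) (F R : List (Int × Int)) (hF : ∀ a ∈ F, a.2 = m)
    (hR : ∀ r ∈ R, r.2 < m) :
    pvTakeTop m (F ++ R) = F.map (fun p => p.1) := by
  induction F with
  | nil =>
    cases R with
    | nil => rfl
    | cons r R0 =>
      obtain ⟨rk, rv⟩ := r
      have : rv < m := hR (rk, rv) (List.mem_cons_self)
      simp [pvTakeTop, this.ne]
  | cons f F0 ih =>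
    obtain ⟨fk, fv⟩ := f
    have hfv : fv = m := hF (fk, fv) (List.mem_cons_self)
    have := ih (fun a ha => hF a (List.mem_cons_of_mem _ ha))
    simp [pvTakeTop, hfv, this]

-- ===== VERDICT (by name: the statement is the Claim_ definition above) =====
theorem encontrar_modas_spec : Claim_equal_encontrar_modas := by
  intro numeros _
  unfold Spec_encontrar_modas
  by_cases hnil : numeros = []
  · subst hnil; rfl
  obtain ⟨hdict, hub, hat⟩ := loopA_main numeros
  have hB : numeros.foldl
      (fun (d : PySem.Dict Int Int) num => d.insert num (d.getD num 0 + 1))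
      PySem.Dict.empty = PySem.Dict.counter numeros := by
    simpa using loopB numeros []
  simp only [encontrar_modas, encontrar_modas_alt]
  rw [hdict, hB, PySem.Dict.items_counter]
  set mf := (numeros.foldl
      (fun (s : PySem.Dict Int Int × Int) num =>
        let c := s.1.getD num 0 + 1
        (s.1.insert num c, max s.2 c))
      (PySem.Dict.empty, 0)).2 with hmfdef
  set items := (PySem.Set.ofList numeros).map (fun k => (k, (numeros.count k : Int))) with hitems
  have hkeys : ∀ x ∈ items, x.2 ≤ mf := by
    intro x hx
    obtain ⟨k, _, rfl⟩ := List.mem_map.mp hx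
    exact hub k
  have h1 : (1 : Int) ≤ mf := by
    obtain ⟨y, hy⟩ := List.exists_mem_of_ne_nil numeros hnil
    have hc : 0 < numeros.count y := List.count_pos_iff.mpr hy
    have := hub y
    omega
  obtain ⟨k, hk, hkc⟩ : ∃ k ∈ numeros, (numeros.count k : Int) = mf := by
    rcases hat with h0 | h
    · omega
    · exact h
  set F := items.filter (fun a => a.2 == mf) with hFdef
  have hFne : F ≠ [] := by
    have hmem : (k, (numeros.count k : Int)) ∈ items :=
      List.mem_map.mpr ⟨k, (PySem.Set.mem_ofList numeros k).mpr hk, rfl⟩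
    have : (k, (numeros.count k : Int)) ∈ F :=
      List.mem_filter.mpr ⟨hmem, by simp [hkc]⟩
    exact List.ne_nil_of_mem this
  obtain ⟨R', hR', hsplit⟩ := ranked_split mf items [] [] (by simp) (by simp) hkeys
  have hsorted : PySem.List.sorted items (fun item => item.2) true = F ++ R' := by
    rw [PySem.List.sorted_rev_eq_foldl_insertBy]
    simpa using hsplit
  obtain ⟨f0, F0, hFc⟩ : ∃ f0 F0, F = f0 :: F0 := by
    cases hF : F with
    | nil => exact absurd hF hFne
    | cons a b => exact ⟨a, b, rfl⟩
  obtain ⟨k0, v0⟩ := f0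
  have hv0 : v0 = mf := by
    have hm : (k0, v0) ∈ F := hFc ▸ List.mem_cons_self
    have := List.of_mem_filter hm
    simpa using this
  subst hv0
  have hFall : ∀ a ∈ F, a.2 = mf := by
    intro a ha
    have := List.of_mem_filter ha
    simpa using this
  rw [hFc] at hFall
  rw [hsorted, hFc, List.cons_append]
  exact (takeTop_eq mf ((k0, mf) :: F0) R' hFall hR').symm
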